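-- pv_equiv track=rewrite | github.com/jualianz229/qa-ai-agent | core/ai_engine.py | _prioritize_text_items
-- ===== SOURCE A (Python) =====
-- def _prioritize_text_items(
--
--     values: list[object],
--     priority_terms: list[str],
--     limit: int,
--     max_len: int = 120,
-- ) -> list[str]:
--     lowered_terms = [term.lower() for term in priority_terms if term]
--     rows = []
--     for index, value in enumerate(values[:40]):
--         text = str(value or "").strip()
--         if not text:
--             continue
--         normalized = text[:max_len]
--         haystack = normalized.lower()
--         score = sum(1 for term in lowered_terms if term in haystack)
--         rows.append((score, index, normalized))
--     rows.sort(key=lambda item: (-item[0], item[1]))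
--     return [item[2] for item in rows[:limit]]
-- ===== SOURCE B (Python) =====
-- def _prioritize_text_items(
--     values,
--     priority_terms,
--     limit,
--     max_len=120,
-- ):
--     terms = [term.lower() for term in priority_terms if term]
--     kept = [str(v or "").strip()[:max_len]
--             for v in values[:40] if str(v or "").strip()]
--     scored = [(sum(1 for t in terms if t in n.lower()), n) for n in kept]
--     ordered = []
--     for wanted in range(len(terms), -1, -1):
--         ordered.extend(n for sc, n in scored if sc == wanted)
--     return ordered[:limit]
-- ===== Notes on version B (the rewrite author's own statement) =====
-- stated objective: alternative
-- what changed: Replaces the tuple-building loop plus comparison sort on (-score, index) keys by staged passes: a comprehension normalizes and keeps the non-empty texts in input order, each kept text is scored once into (score, text) pairs, and one selection sweep per score from the maximum possible score down to 0 appends the texts with exactly that score — no per-index tuples and no sort.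
import Mathlib
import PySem

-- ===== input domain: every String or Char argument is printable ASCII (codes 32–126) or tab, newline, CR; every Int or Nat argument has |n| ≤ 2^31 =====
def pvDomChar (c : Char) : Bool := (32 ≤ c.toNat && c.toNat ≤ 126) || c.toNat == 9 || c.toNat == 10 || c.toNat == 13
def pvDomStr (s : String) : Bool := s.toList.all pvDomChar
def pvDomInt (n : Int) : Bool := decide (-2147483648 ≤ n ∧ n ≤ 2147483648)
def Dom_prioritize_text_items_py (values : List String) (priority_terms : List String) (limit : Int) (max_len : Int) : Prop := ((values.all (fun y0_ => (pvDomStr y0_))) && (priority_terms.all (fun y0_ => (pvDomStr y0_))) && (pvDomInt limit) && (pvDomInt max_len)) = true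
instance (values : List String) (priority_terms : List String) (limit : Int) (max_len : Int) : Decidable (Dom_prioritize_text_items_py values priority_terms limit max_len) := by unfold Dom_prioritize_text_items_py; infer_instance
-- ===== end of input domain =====

-- B replaces A's tuple-building loop plus comparison sort on (-score, index) keys by two
-- staged passes: normalize-and-keep in input order, then one selection sweep per score
-- from the top score down to 0 (objective: alternative).
-- values are strings, so Python's `str(value or "").strip()` is `value.strip()` (empty stays empty).

-- ===== PORT A =====
def prioritize_text_items_py (values : List String) (priority_terms : List String) (limit : Int) (max_len : Int) : List String :=
  let lowered_terms := (priority_terms.filter (fun term => !(term == ""))).map PySem.Str.lower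
  let rows : List (Int × Int × String) :=
    (PySem.List.enumerate (PySem.List.slice values none (some 40))).foldl
      (fun rows p =>
        let text := PySem.Str.strip p.2
        if text = "" then rows
        else
          let normalized := PySem.Str.slice text none (some max_len)
          let haystack := PySem.Str.lower normalized
          let score : Int := (lowered_terms.map (fun term => if PySem.Str.isIn term haystack then (1 : Int) else 0)).sum
          rows ++ [(score, p.1, normalized)]) []
  let rows := PySem.List.sorted2 rows (fun item => -item.1) (fun item => item.2.1)
  (PySem.List.slice rows none (some limit)).map (fun item => item.2.2)

-- ===== PORT B =====
def prioritize_text_items_py_alt (values : List String) (priority_terms : List String) (limit : Int) (max_len : Int) : List String :=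
  let terms := (priority_terms.filter (fun term => !(term == ""))).map PySem.Str.lower
  let kept :=
    ((PySem.List.slice values none (some 40)).filter
        (fun v => !(PySem.Str.strip v == ""))).map
      (fun v => PySem.Str.slice (PySem.Str.strip v) none (some max_len))
  let scored :=
    kept.map (fun n =>
      ((terms.map (fun t => if PySem.Str.isIn t (PySem.Str.lower n) then (1 : Int) else 0)).sum, n))
  let ordered :=
    (PySem.List.pyRange (terms.length : Int) (-1) (-1)).foldl
      (fun ordered wanted =>
        ordered ++ (scored.filter (fun p => p.1 == wanted)).map (fun p => p.2))
      []
  PySem.List.slice ordered none (some limit)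

-- ===== PRECONDITION & SPEC =====
def Spec_prioritize_text_items_py (values : List String) (priority_terms : List String) (limit : Int) (max_len : Int) (out : List String) : Prop := out = prioritize_text_items_py_alt values priority_terms limit max_len
instance (values : List String) (priority_terms : List String) (limit : Int) (max_len : Int) (out : List String) : Decidable (Spec_prioritize_text_items_py values priority_terms limit max_len out) := by unfold Spec_prioritize_text_items_py; infer_instance

-- ===== CLAIM (what is proved, stated in full; the proofs are below) =====
def Claim_equal_prioritize_text_items_py : Prop := ∀ (values : List String) (priority_terms : List String) (limit : Int) (max_len : Int), Dom_prioritize_text_items_py values priority_terms limit max_len → Spec_prioritize_text_items_py values priority_terms limit max_len (prioritize_text_items_py values priority_terms limit max_len)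

-- ===== LEMMAS AND PROOFS =====

-- abbreviations for the per-item computations both ports share
def pvNorm (ml : Int) (v : String) : String := PySem.Str.slice (PySem.Str.strip v) none (some ml)
def pvCnt (lt : List String) (ml : Int) (v : String) : Nat :=
  (lt.filter (fun term => PySem.Str.isIn term (PySem.Str.lower (pvNorm ml v)))).length
def pvRowOf (lt : List String) (ml : Int) (p : Int × String) : Int × Int × String :=
  ((pvCnt lt ml p.2 : Int), p.1, pvNorm ml p.2)
def pvK (r : Int × Int × String) : Int := -64 * r.1 + r.2.1

-- slice commutes with map
theorem pv_map_slice {α β : Type} (f : α → β) (xs : List α) (a b : Option Int) :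
    (PySem.List.slice xs a b).map f = PySem.List.slice (xs.map f) a b := by
  simp [PySem.List.slice, List.map_take, List.map_drop]

-- A's accumulation loop is filter-then-map
theorem pv_rows_eq (lt : List String) (ml : Int) (ps : List (Int × String)) (acc : List (Int × Int × String)) :
    ps.foldl
      (fun rows p =>
        let text := PySem.Str.strip p.2
        if text = "" then rows
        else
          let normalized := PySem.Str.slice text none (some ml)
          let haystack := PySem.Str.lower normalized
          let score : Int := (lt.map (fun term => if PySem.Str.isIn term haystack then (1 : Int) else 0)).sum
          rows ++ [(score, p.1, normalized)]) acc
    = acc ++ (ps.filter (fun p => !(PySem.Str.strip p.2 == ""))).map (pvRowOf lt ml) := by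
  have hfun : (fun (rows : List (Int × Int × String)) (p : Int × String) =>
        let text := PySem.Str.strip p.2
        if text = "" then rows
        else
          let normalized := PySem.Str.slice text none (some ml)
          let haystack := PySem.Str.lower normalized
          let score : Int := (lt.map (fun term => if PySem.Str.isIn term haystack then (1 : Int) else 0)).sum
          rows ++ [(score, p.1, normalized)])
      = (fun rows p => if (!(PySem.Str.strip p.2 == "")) = true then rows ++ [pvRowOf lt ml p] else rows) := by
    funext rows p
    by_cases h : PySem.Str.strip p.2 = ""
    · simp [h]
    · simp [h, pvRowOf, pvNorm, pvCnt, PySem.List.sum_map_ite_one_zero, List.countP_eq_length_filter]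
  rw [hfun, PySem.List.foldl_append_if]

-- B's selection sweep over one score picks out one fiber of normalized texts
theorem pv_sweep_eq (lt : List String) (ml : Int) (raws : List String) (s : Nat) :
    (((raws.map (pvNorm ml)).map (fun n =>
          ((lt.map (fun t => if PySem.Str.isIn t (PySem.Str.lower n) then (1 : Int) else 0)).sum, n))).filter
        (fun p => p.1 == (s : Int))).map (fun p => p.2)
      = (raws.filter (fun v => pvCnt lt ml v == s)).map (pvNorm ml) := by
  rw [List.map_map, List.filter_map, List.map_map,
    show ((fun p : Int × String => p.2) ∘
        ((fun n => ((lt.map (fun t => if PySem.Str.isIn t (PySem.Str.lower n) then (1 : Int) else 0)).sum, n)) ∘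
          pvNorm ml)) = pvNorm ml from rfl]
  congr 1
  apply List.filter_congr
  intro v _
  simp [Function.comp, PySem.List.sum_map_ite_one_zero, List.countP_eq_length_filter, pvCnt]

-- partition permutation: flatMap of the fibers of g over a nodup list covering the values
theorem pv_perm_partition {ρ : Type} (ss : List Int) (hnd : ss.Nodup) (l : List ρ) (g : ρ → Int)
    (hall : ∀ x ∈ l, g x ∈ ss) :
    (ss.flatMap (fun s => l.filter (fun x => g x == s))).Perm l := by
  induction ss generalizing l with
  | nil =>
    cases l with
    | nil => simp
    | cons x xs => exact absurd (hall x (by simp)) (by simp)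
  | cons s ss ih =>
    simp only [List.flatMap_cons]
    have hnd' : ss.Nodup := hnd.of_cons
    have hs : s ∉ ss := by simpa using (List.nodup_cons.mp hnd).1
    have key : ∀ t ∈ ss, (l.filter (fun x => !(g x == s))).filter (fun x => g x == t)
        = l.filter (fun x => g x == t) := by
      intro t ht
      rw [List.filter_filter]
      apply List.filter_congr
      intro x hx
      by_cases h : g x = t
      · have hts : t ≠ s := fun hts => hs (hts ▸ ht)
        simp [h, hts]
      · simp [h]
    have heq : ss.flatMap (fun t => l.filter (fun x => g x == t))
        = ss.flatMap (fun t => (l.filter (fun x => !(g x == s))).filter (fun x => g x == t)) := by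
      apply List.flatMap_congr
      intro t ht
      exact (key t ht).symm
    rw [heq]
    have hperm := ih hnd' (l.filter (fun x => !(g x == s))) (by
      intro x hx
      rcases List.mem_filter.mp hx with ⟨hxl, hne⟩
      have hmem := hall x hxl
      have hne' : g x ≠ s := by simpa using hne
      rcases List.mem_cons.mp hmem with h | h
      · exact absurd h hne'
      · exact h)
    exact (hperm.append_left _).trans (List.filter_append_perm _ l)

-- insertBy only looks at comparisons of the inserted element with list members
theorem pv_insertBy_congr {α : Type} (b1 b2 : α → α → Bool) (x : α) (acc : List α)
    (h : ∀ y ∈ acc, b1 x y = b2 x y) :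
    PySem.List.insertBy b1 x acc = PySem.List.insertBy b2 x acc := by
  induction acc with
  | nil => rfl
  | cons y ys ih =>
    have hy : b1 x y = b2 x y := h y (by simp)
    simp only [PySem.List.insertBy, hy]
    by_cases hb : b2 x y = true
    · simp [hb]
    · simp only [hb]
      have := ih (fun z hz => h z (by simp [hz]))
      simpa [PySem.List.insertBy] using congrArg (y :: ·) this

-- the insertion-sort fold is invariant under changing the comparison on the inhabited set
theorem pv_foldl_insertBy_congr {α : Type} (b1 b2 : α → α → Bool) (S : α → Prop)
    (hb : ∀ a b, S a → S b → b1 a b = b2 a b) :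
    ∀ (ps : List α) (acc : List α), (∀ a ∈ ps, S a) → (∀ a ∈ acc, S a) →
      ps.foldl (fun acc x => PySem.List.insertBy b1 x acc) acc
        = ps.foldl (fun acc x => PySem.List.insertBy b2 x acc) acc := by
  intro ps
  induction ps with
  | nil => intro acc _ _; rfl
  | cons x xs ih =>
    intro acc hps hacc
    have hx : S x := hps x (by simp)
    have h1 : PySem.List.insertBy b1 x acc = PySem.List.insertBy b2 x acc :=
      pv_insertBy_congr b1 b2 x acc (fun y hy => hb x y hx (hacc y hy))
    simp only [List.foldl_cons, h1]
    exact ih _ (fun a ha => hps a (by simp [ha]))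
      (fun a ha => by
        rcases (PySem.List.mem_insertBy b2 x a acc).mp ha with rfl | ha
        · exact hx
        · exact hacc a ha)

-- the per-row attributes all rows drawn from `enumerate vs` satisfy
def pvS (lt : List String) (r : Int × Int × String) : Prop :=
  (0 ≤ r.2.1 ∧ r.2.1 < 40) ∧ ∃ c : Nat, c ≤ lt.length ∧ r.1 = (c : Int)

-- sorted-with-scalar-key agrees with sorted2 on rows with in-range indices
theorem pv_sorted2_eq_sortedK (lt : List String) (rows : List (Int × Int × String))
    (hS : ∀ r ∈ rows, pvS lt r) :
    PySem.List.sorted2 rows (fun item => -item.1) (fun item => item.2.1)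
      = PySem.List.sorted rows pvK := by
  have hbool : ∀ a b : Int × Int × String, pvS lt a → pvS lt b →
      (decide (-a.1 < -b.1) || (!decide (-b.1 < -a.1) && decide (a.2.1 < b.2.1)))
        = decide (pvK a < pvK b) := by
    rintro a b ⟨⟨ha0, ha40⟩, _⟩ ⟨⟨hb0, hb40⟩, _⟩
    rw [← decide_not, ← Bool.decide_and, ← Bool.decide_or, decide_eq_decide]
    unfold pvK
    omega
  unfold PySem.List.sorted2 PySem.List.sorted
  exact pv_foldl_insertBy_congr _ _ (pvS lt) hbool rows [] hS (by simp)

-- the heart of the equivalence: sorting the rows by (-score, index) and projecting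
-- the normalized text equals concatenating the score fibers from the top score down
theorem pv_main (lt : List String) (ml : Int) (vs : List String) (hlen : vs.length ≤ 40) :
    (PySem.List.sorted2
        (((PySem.List.enumerate vs).filter (fun p => !(PySem.Str.strip p.2 == ""))).map (pvRowOf lt ml))
        (fun item => -item.1) (fun item => item.2.1)).map (fun item => item.2.2)
    = (((List.range (lt.length + 1)).map
        (fun s => ((vs.filter (fun v => !(PySem.Str.strip v == ""))).filter
          (fun v => pvCnt lt ml v == s)).map (pvNorm ml))).reverse).flatten := by
  set qs := (PySem.List.enumerate vs).filter (fun p => !(PySem.Str.strip p.2 == "")) with hqs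
  set rows := qs.map (pvRowOf lt ml) with hrows
  have hS : ∀ r ∈ rows, pvS lt r := by
    intro r hr
    obtain ⟨p, hp, rfl⟩ := List.mem_map.mp hr
    have hp' : p ∈ PySem.List.enumerate vs := (List.mem_filter.mp hp).1
    obtain ⟨k, hk, rfl⟩ := (PySem.List.mem_enumerate_iff vs 0 p).mp hp'
    have hk40 : (k : Int) < 40 := by exact_mod_cast lt_of_lt_of_le hk hlen
    refine ⟨⟨by simp [pvRowOf], by simp [pvRowOf]; omega⟩, pvCnt lt ml vs[k], ?_, by simp [pvRowOf]⟩
    simpa [pvCnt] using List.length_filter_le _ lt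
  -- the fiber-concatenated order of the rows
  set ss : List Int := ((List.range (lt.length + 1)).reverse).map (fun s : Nat => (s : Int)) with hss
  set ys := ss.flatMap (fun s => rows.filter (fun r => r.1 == s)) with hys
  have hperm : ys.Perm rows := by
    apply pv_perm_partition
    · refine List.Nodup.map (fun a b h => ?_) (List.nodup_reverse.mpr List.nodup_range)
      exact_mod_cast h
    · intro r hr
      obtain ⟨⟨_, _⟩, c, hc, hr1⟩ := hS r hr
      exact List.mem_map.mpr ⟨c, by simp [List.mem_reverse, List.mem_range]; omega, hr1.symm⟩
  have hidx : rows.Pairwise (fun a b => a.2.1 < b.2.1) := by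
    rw [hrows, List.pairwise_map]
    exact (PySem.List.pairwise_lt_enumerate vs 0).sublist List.filter_sublist
  have hpw : ys.Pairwise (fun a b => pvK a < pvK b) := by
    rw [hys, List.flatMap_def, List.pairwise_flatten]
    constructor
    · intro l hl
      obtain ⟨s, _, rfl⟩ := List.mem_map.mp hl
      have h1 : (rows.filter (fun r => r.1 == s)).Pairwise (fun a b => a.2.1 < b.2.1) :=
        hidx.sublist List.filter_sublist
      refine h1.imp_of_mem ?_
      intro a b ha hb hab
      have ha1 : a.1 = s := by simpa using (List.mem_filter.mp ha).2
      have hb1 : b.1 = s := by simpa using (List.mem_filter.mp hb).2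
      unfold pvK; omega
    · rw [List.pairwise_map]
      have hgt : ss.Pairwise (fun a b => b < a) := by
        rw [hss, List.pairwise_map, List.pairwise_reverse]
        have := List.pairwise_lt_range (n := lt.length + 1)
        exact this.imp (by intro a b h; exact_mod_cast h)
      refine hgt.imp_of_mem ?_
      intro s t hs ht hst x hx y hy
      have hx1 : x.1 = s := by simpa using (List.mem_filter.mp hx).2
      have hy1 : y.1 = t := by simpa using (List.mem_filter.mp hy).2
      obtain ⟨⟨hx0, hx40⟩, _⟩ := hS x (List.mem_of_mem_filter hx)
      obtain ⟨⟨hy0, hy40⟩, _⟩ := hS y (List.mem_of_mem_filter hy)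
      unfold pvK; omega
  have hsortK : PySem.List.sorted rows pvK = ys :=
    PySem.List.sorted_eq_of_perm_of_pairwise_lt rows ys pvK hperm hpw
  rw [pv_sorted2_eq_sortedK lt rows hS, hsortK]
  -- project out the normalized strings, fiber by fiber
  rw [hys, List.map_flatMap, hss, List.flatMap_map]
  rw [← List.map_reverse, ← List.flatMap_def]
  apply List.flatMap_congr
  intro s _
  show (rows.filter (fun r => r.1 == (s : Int))).map (fun item => item.2.2)
    = ((vs.filter (fun v => !(PySem.Str.strip v == ""))).filter (fun v => pvCnt lt ml v == s)).map (pvNorm ml)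
  have hvsq : vs.filter (fun v => !(PySem.Str.strip v == "")) = qs.map (fun p => p.2) := by
    rw [hqs]
    rw [show ((PySem.List.enumerate vs).filter (fun p => !(PySem.Str.strip p.2 == "")))
        = ((PySem.List.enumerate vs).filter ((fun v => !(PySem.Str.strip v == "")) ∘ (fun p => p.2))) from rfl]
    rw [← List.filter_map, PySem.List.map_snd_enumerate]
  rw [hvsq, List.filter_map, List.filter_map, List.map_map, List.map_map]
  have hpred : ((fun r : Int × Int × String => r.1 == (s : Int)) ∘ pvRowOf lt ml)
      = ((fun v => pvCnt lt ml v == s) ∘ (fun p : Int × String => p.2)) := by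
    funext p
    simp [pvRowOf]
  rw [hpred]
  rfl

-- B's countdown range lists the scores of range (n+1) cast to Int, highest first
theorem pv_countdown (n : Nat) :
    PySem.List.pyRange (n : Int) (-1) (-1)
      = ((List.range (n + 1)).map (fun s : Nat => (s : Int))).reverse := by
  rw [PySem.List.pyRange_neg_one_eq_reverse]
  norm_num
  rw [show ((n : Int) + 1) = ((n + 1 : Nat) : Int) by push_cast; ring,
    PySem.List.pyRange_zero_natCast]

-- ===== VERDICT (by name: the statement is the Claim_ definition above) =====
theorem prioritize_text_items_py_spec : Claim_equal_prioritize_text_items_py := by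
  intro values priority_terms limit max_len _
  unfold Spec_prioritize_text_items_py prioritize_text_items_py prioritize_text_items_py_alt
  simp only []
  set lt := (priority_terms.filter (fun term => !(term == ""))).map PySem.Str.lower with hlt
  set vs := PySem.List.slice values none (some 40) with hvs
  have hlen : vs.length ≤ 40 := by
    rw [hvs, PySem.List.slice_to _ (by norm_num)]
    simp
  rw [pv_rows_eq lt max_len, List.nil_append, pv_map_slice]
  congr 1
  rw [pv_countdown lt.length]
  have hB : (((List.range (lt.length + 1)).map (fun s : Nat => (s : Int))).reverse).foldl
      (fun ordered wanted =>
        ordered ++ (((((vs.filter (fun v => !(PySem.Str.strip v == ""))).map (pvNorm max_len)).map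
            (fun n => ((lt.map (fun t => if PySem.Str.isIn t (PySem.Str.lower n) then (1 : Int) else 0)).sum, n))).filter
          (fun p => p.1 == wanted)).map (fun p => p.2)))
      []
      = (((List.range (lt.length + 1)).map
          (fun s => ((vs.filter (fun v => !(PySem.Str.strip v == ""))).filter
            (fun v => pvCnt lt max_len v == s)).map (pvNorm max_len))).reverse).flatten := by
    rw [PySem.List.foldl_append_eq_flatMap, List.nil_append, ← List.map_reverse,
      List.flatMap_map, ← List.map_reverse, ← List.flatMap_def]
    apply List.flatMap_congr
    intro s _
    exact pv_sweep_eq lt max_len (vs.filter (fun v => !(PySem.Str.strip v == ""))) s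
  rw [show (fun v => PySem.Str.slice (PySem.Str.strip v) none (some max_len)) = pvNorm max_len from rfl]
  rw [pv_main lt max_len vs hlen, ← hB]
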